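-- pv_equiv track=rewrite | github.com/nuovodapss/turni | reporting.py | _count_work_switches
-- ===== SOURCE A (Python) =====
-- from typing import Dict, List, Tuple, Any
--
-- WORK_STATES = ["M", "P", "N"]
--
-- def _count_work_switches(seq: List[str]) -> int:
--     """Conta quante volte si passa Lavoro↔Non lavoro tra giorni consecutivi."""
--     def is_work(s: str) -> bool:
--         return s in WORK_STATES
--     c = 0
--     for i in range(len(seq) - 1):
--         if is_work(seq[i]) != is_work(seq[i + 1]):
--             c += 1
--     return c
-- ===== SOURCE B (Python) =====
-- from itertools import groupby
-- from typing import List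
--
-- WORK_STATES = ["M", "P", "N"]
--
-- def _count_work_switches(seq: List[str]) -> int:
--     """Collapse consecutive days into work/non-work runs; switches = runs - 1."""
--     ngroups = sum(1 for _ in groupby(s in WORK_STATES for s in seq))
--     return max(0, ngroups - 1)
-- ===== Notes on version B (the rewrite author's own statement) =====
-- stated objective: alternative
-- what changed: Instead of an index loop comparing seq[i] with seq[i+1], B maps the sequence to work/non-work booleans, collapses consecutive equal values into runs with itertools.groupby, and returns max(0, number_of_runs - 1).
import Mathlib
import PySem

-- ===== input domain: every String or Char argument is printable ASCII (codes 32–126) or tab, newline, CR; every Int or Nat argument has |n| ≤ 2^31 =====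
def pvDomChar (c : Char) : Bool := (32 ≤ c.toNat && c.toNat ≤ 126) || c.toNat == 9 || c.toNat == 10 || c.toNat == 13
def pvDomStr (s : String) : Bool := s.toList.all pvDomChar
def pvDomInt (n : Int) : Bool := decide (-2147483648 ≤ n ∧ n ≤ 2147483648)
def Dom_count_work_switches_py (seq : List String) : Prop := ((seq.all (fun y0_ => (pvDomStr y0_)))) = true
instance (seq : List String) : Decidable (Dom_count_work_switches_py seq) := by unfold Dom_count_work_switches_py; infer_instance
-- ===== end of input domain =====

-- B replaces A's index loop over adjacent pairs by collapsing the work/non-work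
-- booleans into runs (groupby) and returning max(0, runs - 1); alternative decomposition, same cost.

-- ===== PORT A =====
-- s in WORK_STATES
def cwsIsWorkA (s : String) : Bool := (["M", "P", "N"] : List String).contains s

def count_work_switches_py (seq : List String) : Int :=
  (PySem.List.pyRange 0 ((seq.length : Int) - 1) 1).foldl
    (fun c i =>
      if cwsIsWorkA (PySem.List.pyGetD seq i "") ≠ cwsIsWorkA (PySem.List.pyGetD seq (i + 1) "")
      then c + 1 else c) 0

-- ===== PORT B =====
def cwsIsWorkB (s : String) : Bool := (["M", "P", "N"] : List String).contains s

-- sum(1 for _ in groupby(bs)): number of maximal runs of equal adjacent booleans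
def cwsNGroups : List Bool → Int
  | [] => 0
  | [_] => 1
  | a :: b :: t => (if a = b then 0 else 1) + cwsNGroups (b :: t)

def count_work_switches_py_alt (seq : List String) : Int :=
  max 0 (cwsNGroups (seq.map cwsIsWorkB) - 1)

-- ===== PRECONDITION & SPEC =====
def Spec_count_work_switches_py (seq : List String) (out : Int) : Prop := out = count_work_switches_py_alt seq
instance (seq : List String) (out : Int) : Decidable (Spec_count_work_switches_py seq out) := by unfold Spec_count_work_switches_py; infer_instance

-- ===== CLAIM (what is proved, stated in full; the proofs are below) =====
def Claim_equal_count_work_switches_py : Prop := ∀ (seq : List String), Dom_count_work_switches_py seq → Spec_count_work_switches_py seq (count_work_switches_py seq)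

-- ===== LEMMAS AND PROOFS =====

-- adjacent-differences count on a boolean list (characterises A's loop)
def cwsAdj : List Bool → Int
  | a :: b :: t => (if a = b then 0 else 1) + cwsAdj (b :: t)
  | _ => 0

theorem cwsAdj_nonneg : ∀ bs : List Bool, 0 ≤ cwsAdj bs
  | [] => le_refl 0
  | [_] => le_refl 0
  | a :: b :: t => by
    have h := cwsAdj_nonneg (b :: t)
    simp only [cwsAdj]
    split_ifs <;> omega

theorem cwsNGroups_eq : ∀ bs : List Bool,
    cwsNGroups bs = cwsAdj bs + (if bs = [] then 0 else 1)
  | [] => by simp [cwsNGroups, cwsAdj]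
  | [_] => by simp [cwsNGroups, cwsAdj]
  | a :: b :: t => by
    have h := cwsNGroups_eq (b :: t)
    simp only [cwsNGroups, cwsAdj, h, if_neg (List.cons_ne_nil b t), if_neg (List.cons_ne_nil a (b :: t))]
    split_ifs <;> omega

-- A's loop, restated over Nat indices
theorem cwsFold_nat (f : String → Bool) : ∀ (xs : List String) (c : Int),
    (List.range (xs.length - 1)).foldl
      (fun c k => if f (xs.getD k "") ≠ f (xs.getD (k + 1) "") then c + 1 else c) c
      = c + cwsAdj (xs.map f)
  | [], c => by simp [cwsAdj]
  | [x], c => by simp [cwsAdj]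
  | x :: y :: t, c => by
    have ih := cwsFold_nat f (y :: t) (if f x ≠ f y then c + 1 else c)
    simp only [List.length_cons, Nat.add_sub_cancel] at ih ⊢
    rw [List.range_succ_eq_map, List.foldl_cons, List.foldl_map]
    simp only [List.getD_cons_zero, List.getD_cons_succ, Nat.succ_eq_add_one] at ih ⊢
    rw [ih]
    simp only [List.map_cons, cwsAdj]
    split_ifs <;> simp_all <;> omega

-- A = adjacent-differences count of the boolean image
theorem cwsA_eq_adj (seq : List String) :
    count_work_switches_py seq = cwsAdj (seq.map cwsIsWorkA) := by
  unfold count_work_switches_py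
  rw [PySem.List.pyRange_one]
  rw [List.foldl_map]
  have hn : ((seq.length : Int) - 1 - 0).toNat = seq.length - 1 := by omega
  rw [hn]
  have hb : (fun (c : Int) (k : ℕ) =>
      if cwsIsWorkA (PySem.List.pyGetD seq (0 + (k : Int)) "") ≠
         cwsIsWorkA (PySem.List.pyGetD seq ((0 + (k : Int)) + 1) "") then c + 1 else c)
    = (fun (c : Int) (k : ℕ) =>
      if cwsIsWorkA (seq.getD k "") ≠ cwsIsWorkA (seq.getD (k + 1) "") then c + 1 else c) := by
    funext c k
    have h1 : (0 + (k : Int)) = ((k : ℕ) : Int) := by omega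
    rw [h1, show ((k : Int) + 1) = (((k + 1 : ℕ)) : Int) by push_cast; ring,
       PySem.List.pyGetD_natCast, PySem.List.pyGetD_natCast]
  rw [hb, cwsFold_nat]
  omega

-- ===== VERDICT (by name: the statement is the Claim_ definition above) =====
theorem count_work_switches_py_spec : Claim_equal_count_work_switches_py := by
  intro seq _
  unfold Spec_count_work_switches_py count_work_switches_py_alt
  rw [cwsA_eq_adj, cwsNGroups_eq]
  have hw : cwsIsWorkB = cwsIsWorkA := rfl
  rw [hw]
  have h0 : 0 ≤ cwsAdj (seq.map cwsIsWorkA) := cwsAdj_nonneg _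
  cases seq with
  | nil => simp [cwsAdj]
  | cons x t =>
    simp only [List.map_cons] at h0 ⊢
    rw [if_neg (List.cons_ne_nil _ _)]
    omega
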